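-- pv_equiv track=rewrite | github.com/Mesteriis/dashboard | src/api/v1/dashboard.py | _if_none_match_matches
-- ===== SOURCE A (Python) =====
-- def _if_none_match_matches(value: str | None, current_etag: str) -> bool:
--     if not value:
--         return False
--
--     for candidate in value.split(","):
--         token = candidate.strip()
--         if token == "*":
--             return True
--         if token == current_etag:
--             return True
--         if token.startswith("W/") and token[2:] == current_etag:
--             return True
--     return False
-- ===== SOURCE B (Python) =====
-- def _if_none_match_matches(value, current_etag):
--     if not value:
--         return False
--     targets = ("*", current_etag, "W/" + current_etag)
--     buf = []
--     for ch in value + ",":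
--         if ch == ",":
--             if "".join(buf).strip() in targets:
--                 return True
--             buf = []
--         else:
--             buf.append(ch)
--     return False
-- ===== Notes on version B (the rewrite author's own statement) =====
-- stated objective: alternative
-- what changed: Replaces split-into-token-list plus per-token startswith/slice tests by a single character-level streaming scan with an accumulator buffer: segments are delimited on the fly by a sentinel comma and each finished segment is compared against the three precomputed target strings (including the weak key 'W/'+etag).
import Mathlib
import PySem

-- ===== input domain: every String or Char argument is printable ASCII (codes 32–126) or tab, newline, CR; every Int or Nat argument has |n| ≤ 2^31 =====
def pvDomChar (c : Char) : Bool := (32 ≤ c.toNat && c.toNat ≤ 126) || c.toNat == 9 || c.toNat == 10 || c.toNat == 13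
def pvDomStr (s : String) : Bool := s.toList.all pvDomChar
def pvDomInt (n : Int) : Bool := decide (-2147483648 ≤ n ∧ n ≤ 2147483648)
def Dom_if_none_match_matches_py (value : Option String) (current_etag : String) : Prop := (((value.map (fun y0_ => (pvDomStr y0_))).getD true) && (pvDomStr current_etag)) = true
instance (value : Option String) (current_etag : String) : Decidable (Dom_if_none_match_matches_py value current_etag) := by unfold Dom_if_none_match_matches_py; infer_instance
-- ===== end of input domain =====

-- B replaces A's split-into-tokens loop with per-token startswith/slice tests by a single
-- character-level streaming scan with an accumulator buffer, comparing each finished segment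
-- against the three precomputed target strings; objective: alternative (same cost, different shape).

-- ===== PORT A =====
-- the 'for candidate in value.split(",")' loop with its early returns
def pvLoopA : List String → String → Bool
  | [], _ => false
  | c :: rest, e =>
    let token := PySem.Str.strip c
    if token = "*" then true
    else if token = e then true
    else if PySem.Str.startswith token "W/" && (PySem.Str.slice token (some 2) none == e) then true
    else pvLoopA rest e

def if_none_match_matches_py (value : Option String) (current_etag : String) : Bool :=
  match value with
  | none => false
  | some v =>
    if v = "" then false
    else pvLoopA ((PySem.Str.split? v ",").getD []) current_etag

-- ===== PORT B =====
-- the 'for ch in value + ","' streaming loop: buf accumulates the current segment,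
-- a comma flushes it and tests membership in the three targets
def pvScanB (targets : List String) : List Char → List Char → Bool
  | _, [] => false
  | buf, c :: rest =>
    if c = ',' then
      if targets.contains (PySem.Str.strip (String.ofList buf)) then true
      else pvScanB targets [] rest
    else pvScanB targets (buf ++ [c]) rest

def if_none_match_matches_py_alt (value : Option String) (current_etag : String) : Bool :=
  match value with
  | none => false
  | some v =>
    if v = "" then false
    else
      let targets : List String := ["*", current_etag, "W/" ++ current_etag]
      pvScanB targets [] (v.toList ++ [','])

-- ===== PRECONDITION & SPEC =====
def Spec_if_none_match_matches_py (value : Option String) (current_etag : String) (out : Bool) : Prop := out = if_none_match_matches_py_alt value current_etag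
instance (value : Option String) (current_etag : String) (out : Bool) : Decidable (Spec_if_none_match_matches_py value current_etag out) := by unfold Spec_if_none_match_matches_py; infer_instance

-- ===== CLAIM (what is proved, stated in full; the proofs are below) =====
def Claim_equal_if_none_match_matches_py : Prop := ∀ (value : Option String) (current_etag : String), Dom_if_none_match_matches_py value current_etag → Spec_if_none_match_matches_py value current_etag (if_none_match_matches_py value current_etag)

-- ===== LEMMAS AND PROOFS =====

-- reference comma-splitter used only by the proofs
def pvSplit : List Char → List (List Char)
  | [] => [[]]
  | c :: rest =>
    if c = ',' then [] :: pvSplit rest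
    else
      match pvSplit rest with
      | [] => [[c]]
      | h :: t => (c :: h) :: t

def pvMerge (pre : List Char) : List (List Char) → List (List Char)
  | [] => [pre]
  | h :: t => (pre ++ h) :: t

theorem pvSplit_ne_nil (cs : List Char) : pvSplit cs ≠ [] := by
  cases cs with
  | nil => simp [pvSplit]
  | cons c rest =>
    simp only [pvSplit]
    split_ifs
    · simp
    · cases pvSplit rest <;> simp

theorem pvGo_spec (l : List Char) : ∀ (fuel : Nat) (cur : List Char) (acc : List (List Char)),
    l.length ≤ fuel →
    PySem.Chars.splitOn.go [','] fuel l cur acc = acc.reverse ++ pvMerge cur.reverse (pvSplit l) := by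
  induction l with
  | nil =>
    intro fuel cur acc _
    cases fuel <;> simp [PySem.Chars.splitOn.go, pvSplit, pvMerge]
  | cons c rest ih =>
    intro fuel cur acc hf
    cases fuel with
    | zero => simp at hf
    | succ f =>
      have hf' : rest.length ≤ f := by simpa using hf
      by_cases hc : c = ','
      · subst hc
        have hpre : List.isPrefixOf [','] (',' :: rest) = true := by simp [List.isPrefixOf]
        simp only [PySem.Chars.splitOn.go, hpre, if_pos]
        rw [show List.drop [','].length (',' :: rest) = rest from rfl]
        rw [ih f [] (cur.reverse :: acc) hf']
        simp only [pvSplit, if_pos]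
        cases h : pvSplit rest with
        | nil => exact absurd h (pvSplit_ne_nil rest)
        | cons h' t => simp [pvMerge]
      · have hpre : List.isPrefixOf [','] (c :: rest) = false := by
          simp [List.isPrefixOf]; exact fun h => absurd h.symm hc
        simp only [PySem.Chars.splitOn.go, hpre]
        rw [if_neg (by simp)]
        rw [ih f (c :: cur) acc hf']
        simp only [pvSplit, if_neg hc]
        cases h : pvSplit rest with
        | nil => exact absurd h (pvSplit_ne_nil rest)
        | cons h' t => simp [pvMerge]
      
theorem pvSplitOn_comma (cs : List Char) : PySem.Chars.splitOn cs [','] = pvSplit cs := by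
  rw [PySem.Chars.splitOn, pvGo_spec cs (cs.length + 1) [] [] (by omega)]
  cases h : pvSplit cs with
  | nil => exact absurd h (pvSplit_ne_nil cs)
  | cons h' t => simp [pvMerge]

theorem pvSplit?_comma (v : String) :
    (PySem.Str.split? v ",").getD [] = (pvSplit v.toList).map String.ofList := by
  have h := PySem.Str.split?_map v ","
  rw [show (",").toList = [','] from rfl] at h
  rw [PySem.Chars.split?] at h
  simp only [List.isEmpty] at h
  rw [pvSplitOn_comma] at h
  cases hs : PySem.Str.split? v "," with
  | none => rw [hs] at h; simp at h
  | some ms =>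
    rw [hs] at h
    simp only [Option.map_some] at h
    have hms : ms.map String.toList = pvSplit v.toList := by
      simpa using h
    simp only [Option.getD_some]
    rw [← hms, List.map_map]
    simp [Function.comp_def]

theorem pvSplit_no_comma (b : List Char) (h : ',' ∉ b) : pvSplit b = [b] := by
  induction b with
  | nil => rfl
  | cons c rest ih =>
    have hc : c ≠ ',' := fun hc => h (hc ▸ List.mem_cons_self)
    have hr : ',' ∉ rest := fun hr => h (List.mem_cons_of_mem _ hr)
    simp only [pvSplit, if_neg hc, ih hr]

theorem pvSplit_append_comma (b rest : List Char) (h : ',' ∉ b) :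
    pvSplit (b ++ ',' :: rest) = b :: pvSplit rest := by
  induction b with
  | nil => simp [pvSplit]
  | cons c b' ih =>
    have hc : c ≠ ',' := fun hc => h (hc ▸ List.mem_cons_self)
    have hb : ',' ∉ b' := fun hr => h (List.mem_cons_of_mem _ hr)
    simp only [List.cons_append, pvSplit, if_neg hc, ih hb]

theorem pvScanB_spec (targets : List String) (cs : List Char) :
    ∀ (buf : List Char), ',' ∉ buf →
    (pvScanB targets buf (cs ++ [',']) = true ↔
      ∃ seg ∈ pvSplit (buf ++ cs), targets.contains (PySem.Str.strip (String.ofList seg)) = true) := by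
  induction cs with
  | nil =>
    intro buf hbuf
    simp only [List.nil_append, List.append_nil, pvScanB, pvSplit_no_comma buf hbuf]
    rw [if_pos trivial]
    by_cases h : targets.contains (PySem.Str.strip (String.ofList buf)) = true
    · rw [if_pos h]
      exact iff_of_true rfl ⟨buf, List.mem_cons_self, h⟩
    · rw [if_neg h]
      simp only [Bool.false_eq_true, false_iff, List.mem_singleton, not_exists]
      rintro seg ⟨rfl, hp⟩
      exact h hp
  | cons c rest ih =>
    intro buf hbuf
    by_cases hc : c = ','
    · subst hc
      simp only [List.cons_append, pvScanB, pvSplit_append_comma buf rest hbuf]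
      rw [if_pos trivial]
      by_cases h : targets.contains (PySem.Str.strip (String.ofList buf)) = true
      · rw [if_pos h]
        exact iff_of_true rfl ⟨buf, List.mem_cons_self, h⟩
      · rw [if_neg h, ih [] (by simp)]
        simp only [List.nil_append, List.mem_cons]
        constructor
        · rintro ⟨seg, hm, hp⟩; exact ⟨seg, Or.inr hm, hp⟩
        · rintro ⟨seg, hm | hm, hp⟩
          · subst hm; exact absurd hp h
          · exact ⟨seg, hm, hp⟩
    · have hbuf' : ',' ∉ buf ++ [c] := by
        intro hm
        rcases List.mem_append.mp hm with h1 | h1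
        · exact hbuf h1
        · simp at h1; exact hc h1.symm
      simp only [List.cons_append, pvScanB, if_neg hc]
      rw [ih (buf ++ [c]) hbuf']
      simp [List.append_assoc]

-- A's weak-validator test (startswith "W/" and token[2:] == etag) holds iff token = "W/" ++ etag
theorem pvWeakEq (t e : String) :
    (PySem.Str.startswith t "W/" && (PySem.Str.slice t (some 2) none == e)) = (t == "W/" ++ e) := by
  have happ : ("W/" ++ e).toList = 'W' :: '/' :: e.toList := by
    rw [String.toList_append]; rfl
  cases hs : PySem.Str.startswith t "W/" with
  | false =>
    simp only [Bool.false_and]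
    symm
    rw [beq_eq_false_iff_ne]
    intro hEq; subst hEq
    rw [PySem.Str.startswith_eq] at hs
    have hpre : ("W/".toList <+: ("W/" ++ e).toList) := by
      rw [String.toList_append]; exact List.prefix_append _ _
    have h2 := (PySem.Chars.startswith_iff _ _).mpr hpre
    rw [hs] at h2
    exact Bool.false_ne_true h2
  | true =>
    rw [PySem.Str.startswith_eq, PySem.Chars.startswith_iff] at hs
    obtain ⟨rest, hrest⟩ := hs
    have hcons : t.toList = 'W' :: '/' :: rest := by rw [← hrest]; rfl
    have hslice : (PySem.Str.slice t (some 2) none).toList = rest := by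
      rw [PySem.Str.toList_slice, PySem.Chars.slice_eq_listSlice,
        show ((2 : Int)) = ((2 : Nat) : Int) from rfl, PySem.List.slice_from_natCast, hcons]
      rfl
    simp only [Bool.true_and]
    rw [Bool.eq_iff_iff, beq_iff_eq, beq_iff_eq]
    constructor
    · intro he
      have hre : rest = e.toList := by rw [← hslice, he]
      apply String.toList_inj.mp
      rw [hcons, happ, hre]
    · intro he
      have h3 : ('W' :: '/' :: rest : List Char) = 'W' :: '/' :: e.toList := by
        rw [← hcons, he, happ]
      have hre : rest = e.toList := by simpa using h3
      apply String.toList_inj.mp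
      rw [hslice, hre]

theorem pvLoopA_true_iff (l : List String) (e : String) :
    pvLoopA l e = true ↔
      ∃ c ∈ l, PySem.Str.strip c = "*" ∨ PySem.Str.strip c = e ∨ PySem.Str.strip c = "W/" ++ e := by
  induction l with
  | nil => simp [pvLoopA]
  | cons c rest ih =>
    simp only [pvLoopA, pvWeakEq]
    by_cases h1 : PySem.Str.strip c = "*"
    · simp [h1]
    · by_cases h2 : PySem.Str.strip c = e
      · simp [h2]
      · by_cases h3 : PySem.Str.strip c = "W/" ++ e
        · simp [h3]
        · simp [h1, h2, h3, ih]

-- ===== VERDICT (by name: the statement is the Claim_ definition above) =====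
theorem if_none_match_matches_py_spec : Claim_equal_if_none_match_matches_py := by
  intro value current_etag _
  unfold Spec_if_none_match_matches_py
  cases value with
  | none => rfl
  | some v =>
    by_cases hv : v = ""
    · simp [if_none_match_matches_py, if_none_match_matches_py_alt, hv]
    · simp only [if_none_match_matches_py, if_none_match_matches_py_alt, if_neg hv]
      rw [pvSplit?_comma]
      rw [Bool.eq_iff_iff, pvLoopA_true_iff,
        pvScanB_spec _ v.toList [] (by simp)]
      simp only [List.nil_append, List.mem_map, List.contains_eq_mem, decide_eq_true_eq,
        List.mem_cons, List.not_mem_nil, or_false]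
      constructor
      · rintro ⟨c, ⟨seg, hseg, rfl⟩, hp⟩
        exact ⟨seg, hseg, by tauto⟩
      · rintro ⟨seg, hseg, hp⟩
        exact ⟨String.ofList seg, ⟨seg, hseg, rfl⟩, by tauto⟩
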